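-- pv_equiv track=rewrite | github.com/peterbell10/build_analysis | build_analysis/dependencies.py | parse_deps
-- ===== SOURCE A (Python) =====
-- from typing import Dict, List, Set, Optional
--
-- Deps = Dict[str, List[str]]
--
-- def parse_deps(deps_str: str) -> Deps:
--     deps = {}
--     cur_target: Optional[str] = None
--     cur_deps: Optional[List[str]] = None
--
--     def flush_target():
--         if cur_target is not None:
--             assert cur_deps is not None
--             assert cur_target not in deps
--             deps[cur_target] = cur_deps
--
--     for line in deps_str.split('\n'):
--         if line.startswith('    '):
--             assert cur_deps is not None
--             cur_deps.append(line[4:])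
--         elif len(line) > 0:
--             flush_target()
--             colon_pos = line.find(':')
--             cur_target = line[:colon_pos]
--             cur_deps = []
--
--     flush_target()
--     return deps
-- ===== SOURCE B (Python) =====
-- def parse_deps(deps_str):
--     # Phase 1: group lines into (header, dep-lines) blocks.
--     blocks = []
--     for line in deps_str.split('\n'):
--         if line.startswith('    '):
--             assert blocks
--             blocks[-1][1].append(line[4:])
--         elif line:
--             blocks.append((line, []))
--     # Phase 2: map each block to its target and build the dict.
--     deps = {}
--     for header, body in blocks:
--         target = header[:header.find(':')]
--         assert target not in deps
--         deps[target] = body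
--     return deps
-- ===== Notes on version B (the rewrite author's own statement) =====
-- stated objective: alternative
-- what changed: Replaces A's single-pass cur_target/cur_deps flush state machine with a two-phase group-then-map decomposition: first partition the lines into (header, dep-lines) blocks, then a second pass turns each block into its target and builds the dict.
import Mathlib
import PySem

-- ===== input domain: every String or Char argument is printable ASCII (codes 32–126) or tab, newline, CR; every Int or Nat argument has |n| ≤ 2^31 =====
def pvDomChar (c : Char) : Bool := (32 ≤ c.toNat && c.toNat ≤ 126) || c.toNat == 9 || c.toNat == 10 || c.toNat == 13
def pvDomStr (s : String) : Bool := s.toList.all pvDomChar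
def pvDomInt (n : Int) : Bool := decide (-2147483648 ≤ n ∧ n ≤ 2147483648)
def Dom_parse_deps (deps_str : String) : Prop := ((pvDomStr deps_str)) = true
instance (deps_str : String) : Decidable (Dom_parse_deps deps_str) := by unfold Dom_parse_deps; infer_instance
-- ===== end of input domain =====

-- B replaces A's running cur_target/cur_deps flush state machine by a two-phase
-- group-then-map decomposition (collect (header, deps) blocks, then build the dict);
-- same cost, objective: alternative.

-- line[:line.find(':')]  (both Pythons compute this; Python slices with -1 when ':' is absent)
def pvTarget (line : String) : String :=
  PySem.Str.slice line none (some (PySem.Str.find line ":"))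

-- ===== PORT A =====
-- flush_target(): the two asserts hold exactly on Pre_; outside Pre_ Python raises AssertionError
def pvFlushA (deps : PySem.Dict String (List String))
    (cur : Option String × Option (List String)) : PySem.Dict String (List String) :=
  match cur.1 with
  | none => deps
  | some t => deps.insert t (cur.2.getD [])

-- one iteration of A's for-loop over lines; state = (deps, cur_target, cur_deps)
def pvStepA (st : PySem.Dict String (List String) × Option String × Option (List String))
    (line : String) : PySem.Dict String (List String) × Option String × Option (List String) :=
  if PySem.Str.startswith line "    " then
    match st.2.2 with
    | some ds => (st.1, st.2.1, some (ds ++ [PySem.Str.slice line (some 4) none]))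
    | none => st   -- Python: `assert cur_deps is not None` fails (AssertionError); excluded by Pre_
  else if PySem.Str.len line > 0 then
    (pvFlushA st.1 st.2, some (pvTarget line), some ([] : List String))
  else st

def parse_deps (deps_str : String) : List (String × List String) :=
  -- deps_str.split('\n'); the separator is non-empty so split? is never none
  let lines := (PySem.Str.split? deps_str "\n").getD []
  let st := lines.foldl pvStepA ((PySem.Dict.empty : PySem.Dict String (List String)), none, none)
  (pvFlushA st.1 st.2).items

-- ===== PORT B =====
-- blocks[-1][1].append(x); on empty blocks Python's `assert blocks` fails (excluded by Pre_)
def pvAddLast (blocks : List (String × List String)) (x : String) : List (String × List String) :=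
  match blocks with
  | [] => []
  | [(h, b)] => [(h, b ++ [x])]
  | p :: rest => p :: pvAddLast rest x

-- one iteration of B's phase-1 grouping loop
def pvCollect (blocks : List (String × List String)) (line : String) : List (String × List String) :=
  if PySem.Str.startswith line "    " then pvAddLast blocks (PySem.Str.slice line (some 4) none)
  else if PySem.Str.len line > 0 then blocks ++ [(line, [])]
  else blocks

def parse_deps_alt (deps_str : String) : List (String × List String) :=
  let lines := (PySem.Str.split? deps_str "\n").getD []
  let blocks := lines.foldl pvCollect []
  -- phase 2: for header, body in blocks: deps[header[:header.find(':')]] = body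
  (blocks.foldl (fun d p => d.insert (pvTarget p.1) p.2)
      (PySem.Dict.empty : PySem.Dict String (List String))).items

-- ===== PRECONDITION & SPEC =====
def pvIsHeader (l : String) : Bool := !(PySem.Str.startswith l "    ") && decide (PySem.Str.len l > 0)

-- Pre_ excludes exactly the inputs on which Python A raises AssertionError: an indented
-- line before the first header line, or two headers with the same target.
def Pre_parse_deps (deps_str : String) : Prop :=
  let lines := (PySem.Str.split? deps_str "\n").getD []
  ((lines.takeWhile (fun l => !pvIsHeader l)).all (fun l => PySem.Str.len l == 0)) = true
  ∧ ((lines.filter pvIsHeader).map pvTarget).Nodup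

instance (deps_str : String) : Decidable (Pre_parse_deps deps_str) := by
  unfold Pre_parse_deps; infer_instance

def pvWitness_parse_deps : String := "a:\n    x\n\nb\n    y\n    z"

def Spec_parse_deps (deps_str : String) (out : List (String × List String)) : Prop := out = parse_deps_alt deps_str
instance (deps_str : String) (out : List (String × List String)) : Decidable (Spec_parse_deps deps_str out) := by unfold Spec_parse_deps; infer_instance

-- ===== CLAIM (what is proved, stated in full; the proofs are below) =====
def Claim_equal_parse_deps : Prop := ∀ (deps_str : String), Dom_parse_deps deps_str → Pre_parse_deps deps_str → Spec_parse_deps deps_str (parse_deps deps_str)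

-- ===== LEMMAS AND PROOFS =====

lemma pvAddLast_append (bs : List (String × List String)) (h : String) (b : List String)
    (x : String) : pvAddLast (bs ++ [(h, b)]) x = bs ++ [(h, b ++ [x])] := by
  induction bs with
  | nil => rfl
  | cons a as ih =>
    obtain ⟨c, cs, hcs⟩ : ∃ c cs, as ++ [(h, b)] = c :: cs := by
      cases as <;> exact ⟨_, _, rfl⟩
    simp only [List.cons_append]
    rw [hcs] at ih ⊢
    rw [show pvAddLast (a :: c :: cs) x = a :: pvAddLast (c :: cs) x from rfl, ih]

lemma pvMain (lines : List String) :
    ∀ (bs : List (String × List String)) (h : String) (b : List String),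
    (fun st => pvFlushA st.1 st.2)
        (lines.foldl pvStepA
          (bs.foldl (fun d p => d.insert (pvTarget p.1) p.2)
              (PySem.Dict.empty : PySem.Dict String (List String)),
            some (pvTarget h), some b))
      = (lines.foldl pvCollect (bs ++ [(h, b)])).foldl
          (fun d p => d.insert (pvTarget p.1) p.2)
          (PySem.Dict.empty : PySem.Dict String (List String)) := by
  induction lines with
  | nil =>
    intro bs h b
    simp [pvFlushA]
  | cons l ls ih =>
    intro bs h b
    by_cases h1 : PySem.Str.startswith l "    "
    · simp only [List.foldl_cons, pvStepA, pvCollect, h1, if_pos]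
      rw [pvAddLast_append]
      exact ih bs h (b ++ [PySem.Str.slice l (some 4) none])
    · by_cases h2 : PySem.Str.len l > 0
      · simp only [List.foldl_cons, pvStepA, pvCollect, h1, h2, if_neg, if_pos,
          Bool.false_eq_true, not_false_eq_true]
        have : pvFlushA
            (bs.foldl (fun d p => d.insert (pvTarget p.1) p.2)
              (PySem.Dict.empty : PySem.Dict String (List String)))
            (some (pvTarget h), some b)
            = (bs ++ [(h, b)]).foldl (fun d p => d.insert (pvTarget p.1) p.2)
                (PySem.Dict.empty : PySem.Dict String (List String)) := by
          simp [pvFlushA]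
        rw [this]
        have := ih (bs ++ [(h, b)]) l []
        simpa using this
      · simp only [List.foldl_cons, pvStepA, pvCollect, h1, h2, if_neg,
          Bool.false_eq_true, not_false_eq_true]
        exact ih bs h b

lemma pvMain0 (lines : List String) :
    (fun st => pvFlushA st.1 st.2)
        (lines.foldl pvStepA
          ((PySem.Dict.empty : PySem.Dict String (List String)), none, none))
      = (lines.foldl pvCollect []).foldl (fun d p => d.insert (pvTarget p.1) p.2)
          (PySem.Dict.empty : PySem.Dict String (List String)) := by
  induction lines with
  | nil => rfl
  | cons l ls ih =>
    by_cases h1 : PySem.Str.startswith l "    "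
    · simp only [List.foldl_cons, pvStepA, pvCollect, h1, if_pos]
      simpa [pvAddLast] using ih
    · by_cases h2 : PySem.Str.len l > 0
      · simp only [List.foldl_cons, pvStepA, pvCollect, h1, h2, if_neg, if_pos,
          Bool.false_eq_true, not_false_eq_true]
        have := pvMain ls [] l []
        simpa [pvFlushA] using this
      · simp only [List.foldl_cons, pvStepA, pvCollect, h1, h2, if_neg,
          Bool.false_eq_true, not_false_eq_true]
        exact ih

-- ===== VERDICT (by name: the statement is the Claim_ definition above) =====
theorem parse_deps_spec : Claim_equal_parse_deps := by
  intro deps_str _ _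
  unfold Spec_parse_deps parse_deps parse_deps_alt
  exact congrArg PySem.Dict.items (pvMain0 ((PySem.Str.split? deps_str "\n").getD []))
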